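-- pv_equiv track=rewrite | github.com/YanGranat/book-in-one-click | server/main.py | _extract_meta_from_text
-- ===== SOURCE A (Python) =====
-- def _extract_meta_from_text(md: str) -> dict:
--     meta = {}
--     try:
--         for line in md.splitlines()[:80]:
--             line = line.strip()
--             def _val(s: str) -> str:
--                 return s.split(":", 1)[1].strip() if ":" in s else ""
--             if line.startswith("- provider:"):
--                 meta["provider"] = _val(line)
--             elif line.startswith("- lang:"):
--                 meta["lang"] = _val(line)
--             elif line.startswith("- topic:"):
--                 meta["topic"] = _val(line)
--             elif line.startswith("- model_heavy:"):
--                 meta["model_heavy"] = _val(line)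
--             elif line.startswith("- model_fast:"):
--                 meta["model_fast"] = _val(line)
--     except Exception:
--         pass
--     return meta
-- ===== SOURCE B (Python) =====
-- _ALLOWED = {"provider", "lang", "topic", "model_heavy", "model_fast"}
--
-- def _extract_meta_from_text(md: str) -> dict:
--     meta = {}
--     try:
--         for line in md.splitlines()[:80]:
--             line = line.strip()
--             if line.startswith("- ") and ":" in line:
--                 key = line[2:].split(":", 1)[0]
--                 value = line.split(":", 1)[1].strip()
--                 if key in _ALLOWED:
--                     meta[key] = value
--     except Exception:
--         pass
--     return meta
-- ===== Notes on version B (the rewrite author's own statement) =====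
-- stated objective: simpler
-- what changed: Replaces the five-branch startswith prefix chain with one generic key extraction (split at the first colon of the stripped line after '- ') plus a membership test in a fixed allowed-key set.
import Mathlib
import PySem

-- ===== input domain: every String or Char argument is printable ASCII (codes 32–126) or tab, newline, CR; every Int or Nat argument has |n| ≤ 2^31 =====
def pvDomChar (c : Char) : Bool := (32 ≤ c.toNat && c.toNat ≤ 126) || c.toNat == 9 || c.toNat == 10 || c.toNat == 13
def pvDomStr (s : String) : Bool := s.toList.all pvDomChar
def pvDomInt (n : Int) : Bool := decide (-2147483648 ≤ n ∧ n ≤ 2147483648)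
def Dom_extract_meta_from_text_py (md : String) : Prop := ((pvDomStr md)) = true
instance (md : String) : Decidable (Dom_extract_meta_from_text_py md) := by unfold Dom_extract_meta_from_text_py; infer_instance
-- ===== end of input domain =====

-- B replaces A's five-branch startswith chain by one generic key extraction plus a
-- membership test in a fixed allowed-key set (objective: simpler).

-- ===== PORT A =====
-- _val(s): s.split(":", 1)[1].strip() if ":" in s else ""
-- (splitMax?'s Option is none only for sep = "", and the [1] index exists whenever ":" in s,
--  so the .getD defaults below never fire; the try/except in A is dead code: nothing raises.)
def pvValA (s : String) : String :=
  if PySem.Str.isIn ":" s then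
    PySem.Str.strip (PySem.List.pyGetD ((PySem.Str.splitMax? s ":" 1).getD []) 1 "")
  else ""

def extract_meta_from_text_py (md : String) : List (String × String) :=
  let lines := PySem.List.slice (PySem.Str.splitlines md) none (some 80)
  let acc := lines.foldl (fun (m : PySem.Dict String String) line0 =>
    let line := PySem.Str.strip line0
    if PySem.Str.startswith line "- provider:" then m.insert "provider" (pvValA line)
    else if PySem.Str.startswith line "- lang:" then m.insert "lang" (pvValA line)
    else if PySem.Str.startswith line "- topic:" then m.insert "topic" (pvValA line)
    else if PySem.Str.startswith line "- model_heavy:" then m.insert "model_heavy" (pvValA line)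
    else if PySem.Str.startswith line "- model_fast:" then m.insert "model_fast" (pvValA line)
    else m) PySem.Dict.empty
  acc.items

-- ===== PORT B =====
def pvAllowed : PySem.Set String :=
  PySem.Set.ofList ["provider", "lang", "topic", "model_heavy", "model_fast"]

-- (as in A's port, the .getD defaults never fire: the [0] index always exists, and the [1]
--  index exists because the branch requires ":" in line)
def extract_meta_from_text_py_alt (md : String) : List (String × String) :=
  let lines := PySem.List.slice (PySem.Str.splitlines md) none (some 80)
  let acc := lines.foldl (fun (m : PySem.Dict String String) line0 =>
    let line := PySem.Str.strip line0
    if PySem.Str.startswith line "- " && PySem.Str.isIn ":" line then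
      let key := PySem.List.pyGetD
        ((PySem.Str.splitMax? (PySem.Str.slice line (some 2) none) ":" 1).getD []) 0 ""
      let value := PySem.Str.strip (PySem.List.pyGetD ((PySem.Str.splitMax? line ":" 1).getD []) 1 "")
      if pvAllowed.contains key then m.insert key value else m
    else m) PySem.Dict.empty
  acc.items

-- ===== PRECONDITION & SPEC =====
def Spec_extract_meta_from_text_py (md : String) (out : List (String × String)) : Prop := out = extract_meta_from_text_py_alt md
instance (md : String) (out : List (String × String)) : Decidable (Spec_extract_meta_from_text_py md out) := by unfold Spec_extract_meta_from_text_py; infer_instance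

-- ===== CLAIM (what is proved, stated in full; the proofs are below) =====
def Claim_equal_extract_meta_from_text_py : Prop := ∀ (md : String), Dom_extract_meta_from_text_py md → Spec_extract_meta_from_text_py md (extract_meta_from_text_py md)

-- ===== LEMMAS AND PROOFS =====

-- takeWhile/dropWhile decomposition at the first ':'
theorem pv_tw (k r : List Char) (hk : ':' ∉ k) :
    (k ++ ':' :: r).takeWhile (fun c => c != ':') = k := by
  induction k with
  | nil => simp [List.takeWhile]
  | cons a k ih =>
      have ha : a ≠ ':' := by rintro rfl; exact hk (by simp)
      simp only [List.cons_append, List.takeWhile_cons]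
      simp [ha, ih (fun h => hk (List.mem_cons_of_mem _ h))]

theorem pv_decomp (u : List Char) (hc : ':' ∈ u) :
    u.takeWhile (fun c => c != ':') ++ ':' :: (u.dropWhile (fun c => c != ':')).tail = u := by
  induction u with
  | nil => cases hc
  | cons a u ih =>
      by_cases ha : a = ':'
      · subst ha; simp [List.takeWhile_cons, List.dropWhile_cons]
      · have hc' : ':' ∈ u := by cases hc with
          | head => exact absurd rfl ha
          | tail _ h => exact h
        simp [List.takeWhile_cons, List.dropWhile_cons, ha, ih hc']

-- behaviour of splitOnMax.go with sep = [':']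
theorem pv_go0 (fuel : Nat) (l cur : List Char) (acc : List (List Char)) :
    PySem.Chars.splitOnMax.go [':'] fuel 0 l cur acc = ((cur.reverse ++ l) :: acc).reverse := by
  cases fuel with
  | zero => rfl
  | succ f => cases l with
    | nil => simp [PySem.Chars.splitOnMax.go]
    | cons a l => simp [PySem.Chars.splitOnMax.go]

theorem pv_go1_nomem (fuel : Nat) (l : List Char) (hf : l.length < fuel) (hc : ':' ∉ l)
    (cur : List Char) (acc : List (List Char)) :
    PySem.Chars.splitOnMax.go [':'] fuel 1 l cur acc = ((cur.reverse ++ l) :: acc).reverse := by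
  induction fuel generalizing l cur acc with
  | zero => omega
  | succ f ih => cases l with
    | nil => simp [PySem.Chars.splitOnMax.go]
    | cons a l =>
        have ha : a ≠ ':' := by rintro rfl; exact hc (by simp)
        have step : PySem.Chars.splitOnMax.go [':'] (f + 1) 1 (a :: l) cur acc =
            PySem.Chars.splitOnMax.go [':'] f 1 l (a :: cur) acc := by
          rw [PySem.Chars.splitOnMax.go]; simp [List.isPrefixOf, Ne.symm ha]
        rw [step, ih l (by simpa using hf) (fun h => hc (List.mem_cons_of_mem _ h)) (a :: cur) acc]
        simp

theorem pv_go1_mem (fuel : Nat) (l : List Char) (hf : l.length < fuel) (hc : ':' ∈ l)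
    (cur : List Char) (acc : List (List Char)) :
    PySem.Chars.splitOnMax.go [':'] fuel 1 l cur acc =
      acc.reverse ++ [cur.reverse ++ l.takeWhile (fun c => c != ':'),
                      (l.dropWhile (fun c => c != ':')).tail] := by
  induction fuel generalizing l cur acc with
  | zero => omega
  | succ f ih => cases l with
    | nil => cases hc
    | cons a l =>
        by_cases ha : a = ':'
        · subst ha
          have step : PySem.Chars.splitOnMax.go [':'] (f + 1) 1 (':' :: l) cur acc =
              PySem.Chars.splitOnMax.go [':'] f 0 l [] (cur.reverse :: acc) := by
            rw [PySem.Chars.splitOnMax.go]; simp [List.isPrefixOf]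
          rw [step, pv_go0]
          simp [List.takeWhile_cons, List.dropWhile_cons]
        · have hc' : ':' ∈ l := by cases hc with
            | head => exact absurd rfl ha
            | tail _ h => exact h
          have step : PySem.Chars.splitOnMax.go [':'] (f + 1) 1 (a :: l) cur acc =
              PySem.Chars.splitOnMax.go [':'] f 1 l (a :: cur) acc := by
            rw [PySem.Chars.splitOnMax.go]; simp [List.isPrefixOf, Ne.symm ha]
          rw [step, ih l (by simpa using hf) hc' (a :: cur) acc]
          simp [List.takeWhile_cons, List.dropWhile_cons, ha]

theorem pv_splitOnMax_colon (cs : List Char) :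
    PySem.Chars.splitOnMax cs [':'] 1 =
      if ':' ∈ cs then [cs.takeWhile (fun c => c != ':'), (cs.dropWhile (fun c => c != ':')).tail]
      else [cs] := by
  rw [PySem.Chars.splitOnMax]
  rw [if_neg (by omega), show (Int.toNat 1) = 1 from rfl]
  by_cases hc : ':' ∈ cs
  · rw [pv_go1_mem (cs.length + 1) cs (by omega) hc [] []]
    simp [hc]
  · rw [pv_go1_nomem (cs.length + 1) cs (by omega) hc [] []]
    simp [hc]

-- first-colon characterization of a "- <key>:" prefix
theorem pv_key_iff (u : List Char) (hcolu : ':' ∈ u) (kl : List Char) (hk : ':' ∉ kl) :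
    kl ++ [':'] <+: u ↔ u.takeWhile (fun c => c != ':') = kl := by
  constructor
  · rintro ⟨r, rfl⟩
    have h : kl ++ [':'] ++ r = kl ++ ':' :: r := by simp
    rw [h, pv_tw kl r hk]
  · intro hK
    exact ⟨(u.dropWhile (fun c => c != ':')).tail, by rw [← hK]; simpa using pv_decomp u hcolu⟩

theorem pv_sw_iff (t p : String) : PySem.Str.startswith t p = true ↔ p.toList <+: t.toList := by
  rw [PySem.Str.startswith]; exact PySem.Chars.startswith_iff _ _

theorem pv_false_of_ne {b : Bool} {P : Prop} (h : b = true ↔ P) (hne : ¬P) : b = false := by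
  cases b with
  | false => rfl
  | true => exact absurd (h.mp rfl) hne

theorem pv_step_eq' (d : PySem.Dict String String) (t : String) :
    (if PySem.Str.startswith t "- provider:" then d.insert "provider" (pvValA t)
     else if PySem.Str.startswith t "- lang:" then d.insert "lang" (pvValA t)
     else if PySem.Str.startswith t "- topic:" then d.insert "topic" (pvValA t)
     else if PySem.Str.startswith t "- model_heavy:" then d.insert "model_heavy" (pvValA t)
     else if PySem.Str.startswith t "- model_fast:" then d.insert "model_fast" (pvValA t)
     else d) =
    (if PySem.Str.startswith t "- " && PySem.Str.isIn ":" t then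
       (if pvAllowed.contains (PySem.List.pyGetD
            ((PySem.Str.splitMax? (PySem.Str.slice t (some 2) none) ":" 1).getD []) 0 "") then
          d.insert (PySem.List.pyGetD
            ((PySem.Str.splitMax? (PySem.Str.slice t (some 2) none) ":" 1).getD []) 0 "")
            (PySem.Str.strip (PySem.List.pyGetD ((PySem.Str.splitMax? t ":" 1).getD []) 1 ""))
        else d)
     else d) := by
  by_cases hsw : PySem.Str.startswith t "- " = true
  case neg =>
    have hswf : PySem.Str.startswith t "- " = false := by
      cases h : PySem.Str.startswith t "- " with
      | false => rfl
      | true => exact absurd h hsw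
    have hno : ∀ p : String, "- ".toList <+: p.toList → PySem.Str.startswith t p = false := by
      intro p hp
      cases h : PySem.Str.startswith t p with
      | false => rfl
      | true => exact absurd ((pv_sw_iff t "- ").mpr (hp.trans ((pv_sw_iff t p).mp h))) hsw
    rw [hno "- provider:" (by decide), hno "- lang:" (by decide), hno "- topic:" (by decide),
        hno "- model_heavy:" (by decide), hno "- model_fast:" (by decide), hswf]
    simp
  case pos =>
    by_cases hcol : ':' ∈ t.toList
    case neg =>
      have hIsIn : PySem.Str.isIn ":" t = false := by
        rw [PySem.Str.isIn, PySem.Chars.isIn_eq_false_iff]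
        intro h
        exact hcol ((List.singleton_infix_iff ':' t.toList).mp (by simpa using h))
      have hno : ∀ p : String, ':' ∈ p.toList → PySem.Str.startswith t p = false := by
        intro p hp
        cases h : PySem.Str.startswith t p with
        | false => rfl
        | true => exact absurd (((pv_sw_iff t p).mp h).subset hp) hcol
      rw [hno "- provider:" (by decide), hno "- lang:" (by decide), hno "- topic:" (by decide),
          hno "- model_heavy:" (by decide), hno "- model_fast:" (by decide), hIsIn]
      simp
    case pos =>
      obtain ⟨u, hu⟩ : ∃ u, t.toList = '-' :: ' ' :: u := by
        obtain ⟨r, hr⟩ := (pv_sw_iff t "- ").mp hsw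
        exact ⟨r, by rw [← hr]; rfl⟩
      have hcolu : ':' ∈ u := by
        rw [hu] at hcol
        simpa using hcol
      have hIsIn : PySem.Str.isIn ":" t = true := by
        rw [PySem.Str.isIn, PySem.Chars.isIn_iff_infix]
        exact (List.singleton_infix_iff ':' t.toList).mpr hcol
      have hkey : PySem.List.pyGetD
          ((PySem.Str.splitMax? (PySem.Str.slice t (some 2) none) ":" 1).getD []) 0 "" =
          String.ofList (u.takeWhile (fun c => c != ':')) := by
        rw [PySem.Str.splitMax?, PySem.Str.slice, PySem.Chars.splitMax?]
        rw [if_neg (by simp)]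
        have hsl : PySem.Chars.slice t.toList (some 2) none = u := by
          rw [PySem.Chars.slice_eq_listSlice, PySem.List.slice_from t.toList (by omega : (0:Int) ≤ 2), hu]
          rfl
        simp only [String.toList_ofList, hsl]
        rw [show (":".toList) = [':'] from rfl, pv_splitOnMax_colon u, if_pos hcolu]
        rfl
      have hswk : ∀ (p k : String), p.toList = '-' :: ' ' :: (k.toList ++ [':']) → ':' ∉ k.toList →
          (PySem.Str.startswith t p = true ↔ u.takeWhile (fun c => c != ':') = k.toList) := by
        intro p k hp hkk
        rw [pv_sw_iff, hp, hu, List.cons_prefix_cons, List.cons_prefix_cons]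
        simp only [true_and]
        exact pv_key_iff u hcolu k.toList hkk
      have hval : pvValA t =
          PySem.Str.strip (PySem.List.pyGetD ((PySem.Str.splitMax? t ":" 1).getD []) 1 "") := by
        rw [pvValA, if_pos hIsIn]
      rw [hsw, hIsIn, Bool.and_self, hkey]
      by_cases h1 : u.takeWhile (fun c => c != ':') = "provider".toList
      · rw [if_pos ((hswk "- provider:" "provider" (by decide) (by decide)).mpr h1), if_pos rfl,
            h1, hval]
        rfl
      · rw [pv_false_of_ne (hswk "- provider:" "provider" (by decide) (by decide)) h1]
        by_cases h2 : u.takeWhile (fun c => c != ':') = "lang".toList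
        · rw [if_neg (by simp), if_pos ((hswk "- lang:" "lang" (by decide) (by decide)).mpr h2),
              h2, hval]
          rfl
        · rw [pv_false_of_ne (hswk "- lang:" "lang" (by decide) (by decide)) h2]
          by_cases h3 : u.takeWhile (fun c => c != ':') = "topic".toList
          · rw [if_neg (by simp), if_neg (by simp),
                if_pos ((hswk "- topic:" "topic" (by decide) (by decide)).mpr h3), h3, hval]
            rfl
          · rw [pv_false_of_ne (hswk "- topic:" "topic" (by decide) (by decide)) h3]
            by_cases h4 : u.takeWhile (fun c => c != ':') = "model_heavy".toList
            · rw [if_neg (by simp), if_neg (by simp), if_neg (by simp),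
                  if_pos ((hswk "- model_heavy:" "model_heavy" (by decide) (by decide)).mpr h4),
                  h4, hval]
              rfl
            · rw [pv_false_of_ne (hswk "- model_heavy:" "model_heavy" (by decide) (by decide)) h4]
              by_cases h5 : u.takeWhile (fun c => c != ':') = "model_fast".toList
              · rw [if_neg (by simp), if_neg (by simp), if_neg (by simp), if_neg (by simp),
                    if_pos ((hswk "- model_fast:" "model_fast" (by decide) (by decide)).mpr h5),
                    h5, hval]
                rfl
              · rw [pv_false_of_ne (hswk "- model_fast:" "model_fast" (by decide) (by decide)) h5]
                have hcon : pvAllowed.contains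
                    (String.ofList (u.takeWhile (fun c => c != ':'))) = false := by
                  cases h : pvAllowed.contains (String.ofList (u.takeWhile (fun c => c != ':'))) with
                  | false => rfl
                  | true =>
                      have hm := (PySem.Set.contains_iff _ _).mp h
                      have hm' : String.ofList (u.takeWhile (fun c => c != ':')) ∈
                          ["provider", "lang", "topic", "model_heavy", "model_fast"] := by
                        simpa [pvAllowed, PySem.Set.mem_ofList] using hm
                      have htl : ∀ (w : String),
                          String.ofList (u.takeWhile (fun c => c != ':')) = w →
                          u.takeWhile (fun c => c != ':') = w.toList := by
                        intro w hw
                        rw [← hw, String.toList_ofList]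
                      simp only [List.mem_cons, List.not_mem_nil, or_false] at hm'
                      rcases hm' with hw | hw | hw | hw | hw
                      · exact absurd (htl _ hw) h1
                      · exact absurd (htl _ hw) h2
                      · exact absurd (htl _ hw) h3
                      · exact absurd (htl _ hw) h4
                      · exact absurd (htl _ hw) h5
                rw [hcon]
                simp

theorem pv_step_eq (d : PySem.Dict String String) (line : String) :
    (let t := PySem.Str.strip line
     if PySem.Str.startswith t "- provider:" then d.insert "provider" (pvValA t)
     else if PySem.Str.startswith t "- lang:" then d.insert "lang" (pvValA t)
     else if PySem.Str.startswith t "- topic:" then d.insert "topic" (pvValA t)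
     else if PySem.Str.startswith t "- model_heavy:" then d.insert "model_heavy" (pvValA t)
     else if PySem.Str.startswith t "- model_fast:" then d.insert "model_fast" (pvValA t)
     else d) =
    (let t := PySem.Str.strip line
     if PySem.Str.startswith t "- " && PySem.Str.isIn ":" t then
       let key := PySem.List.pyGetD
         ((PySem.Str.splitMax? (PySem.Str.slice t (some 2) none) ":" 1).getD []) 0 ""
       let value := PySem.Str.strip (PySem.List.pyGetD ((PySem.Str.splitMax? t ":" 1).getD []) 1 "")
       if pvAllowed.contains key then d.insert key value else d
     else d) :=
  pv_step_eq' d (PySem.Str.strip line)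

-- ===== VERDICT (by name: the statement is the Claim_ definition above) =====
theorem extract_meta_from_text_py_spec : Claim_equal_extract_meta_from_text_py := by
  intro md _
  unfold Spec_extract_meta_from_text_py extract_meta_from_text_py extract_meta_from_text_py_alt
  have hstep : (fun (m : PySem.Dict String String) line0 =>
      let line := PySem.Str.strip line0
      if PySem.Str.startswith line "- provider:" then m.insert "provider" (pvValA line)
      else if PySem.Str.startswith line "- lang:" then m.insert "lang" (pvValA line)
      else if PySem.Str.startswith line "- topic:" then m.insert "topic" (pvValA line)
      else if PySem.Str.startswith line "- model_heavy:" then m.insert "model_heavy" (pvValA line)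
      else if PySem.Str.startswith line "- model_fast:" then m.insert "model_fast" (pvValA line)
      else m) =
    (fun (m : PySem.Dict String String) line0 =>
      let line := PySem.Str.strip line0
      if PySem.Str.startswith line "- " && PySem.Str.isIn ":" line then
        let key := PySem.List.pyGetD
          ((PySem.Str.splitMax? (PySem.Str.slice line (some 2) none) ":" 1).getD []) 0 ""
        let value := PySem.Str.strip (PySem.List.pyGetD ((PySem.Str.splitMax? line ":" 1).getD []) 1 "")
        if pvAllowed.contains key then m.insert key value else m
      else m) :=
    funext fun d => funext fun line => pv_step_eq d line
  rw [hstep]
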